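-- pv_equiv track=rewrite | github.com/jJup0/LeetCode | Hard/2818. Apply Operations to Maximize Score.py | _get_dominant_areas
-- ===== SOURCE A (Python) =====
-- def _get_dominant_areas(prime_scores: list[int]):
--     """
--     For each score in primes scores get an interval [l, r] (inclusive)
--     of the largest subarray for which is is the largest with the smallest
--     index.
--
--     Complexity:
--         Time: O(n)
--         Space: O(n)
--     """
--     res: list[tuple[int, int]] = [(-1, -1)] * len(prime_scores)
--     # monotone stack for decreasing index score
--     # each element looks like: (score, index in res, start)
--     monotone_stack: list[tuple[int, int, int]] = []
--     for i, score in enumerate(prime_scores):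
--         # pop all smaller prime scores from stack and set
--         # its dominant interval in `res`
--         while monotone_stack and monotone_stack[-1][0] < score:
--             _s, j, start = monotone_stack.pop()
--             res[j] = (start, i - 1)
--
--         if monotone_stack:
--             # if stack is not empty then stack[-1] is the last primescore
--             # that is greater equal the current prime score, so append
--             # its index + 1 as the lower bound of its dominant interval
--             monotone_stack.append((score, i, monotone_stack[-1][1] + 1))
--         else:
--             # largest score so far, its dominant interval starts at 0
--             monotone_stack.append((score, i, 0))
--     # write to result for res of the stack
--     for _s, j, start in monotone_stack:
--         res[j] = (start, len(prime_scores) - 1)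
--     return res
-- ===== SOURCE B (Python) =====
-- def _get_dominant_areas(prime_scores):
--     # Two independent boundary scans per index: nearest previous >= on the
--     # left, nearest strictly greater on the right; no stack needed.
--     n = len(prime_scores)
--     res = []
--     for i in range(n):
--         v = prime_scores[i]
--         l = 0
--         for j in range(i - 1, -1, -1):
--             if prime_scores[j] >= v:
--                 l = j + 1
--                 break
--         r = n - 1
--         for j in range(i + 1, n):
--             if prime_scores[j] > v:
--                 r = j - 1
--                 break
--         res.append((l, r))
--     return res
-- ===== Notes on version B (the rewrite author's own statement) =====
-- stated objective: simpler
-- what changed: Replaced the single monotone stack (with start positions threaded through pushes and a final flush pass) by two independent per-index boundary scans: nearest previous index with score >= current gives the left bound, nearest next index with strictly greater score gives the right bound.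
import Mathlib
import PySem

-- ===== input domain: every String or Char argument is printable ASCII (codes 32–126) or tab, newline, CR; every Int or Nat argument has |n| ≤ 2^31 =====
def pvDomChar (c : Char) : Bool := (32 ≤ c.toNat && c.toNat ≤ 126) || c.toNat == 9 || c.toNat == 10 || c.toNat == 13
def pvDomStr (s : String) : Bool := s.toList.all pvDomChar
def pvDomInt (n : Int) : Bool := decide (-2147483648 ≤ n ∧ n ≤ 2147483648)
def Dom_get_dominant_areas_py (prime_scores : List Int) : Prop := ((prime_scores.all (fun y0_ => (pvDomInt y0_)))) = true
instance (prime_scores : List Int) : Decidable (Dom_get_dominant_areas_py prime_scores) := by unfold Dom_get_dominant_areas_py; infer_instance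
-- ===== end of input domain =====

-- B replaces A's single monotone stack by two independent per-index boundary
-- scans (nearest previous >= score on the left, nearest strictly greater on
-- the right): a plainer decomposition, O(n^2) worst case instead of O(n).

-- ===== PORT A =====
-- the `while monotone_stack and monotone_stack[-1][0] < score` pop loop;
-- stack is kept top-at-head (Python appends/pops at the end).  Indices are
-- Nats (Python's enumerate indices and the starts built from them are
-- always nonnegative and in range, so `res.set j` is exact for `res[j] = …`).
def gdaPop (score : Int) (i : Nat) :
    List (Int × Int) → List (Int × Nat × Nat) → List (Int × Int) × List (Int × Nat × Nat)
  | res, [] => (res, [])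
  | res, (sc, j, st) :: rest =>
    if sc < score then gdaPop score i (res.set j ((st : Int), (i : Int) - 1)) rest
    else (res, (sc, j, st) :: rest)

-- one iteration of `for i, score in enumerate(prime_scores)`
def gdaStep (acc : List (Int × Int) × List (Int × Nat × Nat)) (i : Nat) (score : Int) :
    List (Int × Int) × List (Int × Nat × Nat) :=
  let rs := gdaPop score i acc.1 acc.2
  match rs.2 with
  | [] => (rs.1, [(score, i, 0)])
  | (sc, j, st) :: rest => (rs.1, (score, i, j + 1) :: (sc, j, st) :: rest)

def get_dominant_areas_py (prime_scores : List Int) : List (Int × Int) :=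
  let res0 : List (Int × Int) := List.replicate prime_scores.length (-1, -1)
  let st := prime_scores.zipIdx.foldl (fun acc p => gdaStep acc p.2 p.1) (res0, [])
  -- final `for _s, j, start in monotone_stack:` runs bottom-to-top = reverse of head-first
  st.2.reverse.foldl (fun r e => r.set e.2.1 ((e.2.2 : Int), (prime_scores.length : Int) - 1)) st.1

-- ===== PORT B =====
-- `for j in range(i - 1, -1, -1): if prime_scores[j] >= v: l = j + 1; break`
def gdaPrev (s : List Int) (v : Int) : Nat → Nat
  | 0 => 0
  | j + 1 => if v ≤ s.getD j 0 then j + 1 else gdaPrev s v j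

-- `for j in range(i + 1, n): if prime_scores[j] > v: r = j - 1; break`
def gdaNext (s : List Int) (v : Int) (j : Nat) : Nat :=
  if h : j < s.length then
    (if v < s.getD j 0 then j - 1 else gdaNext s v (j + 1))
  else s.length - 1
termination_by s.length - j

def get_dominant_areas_py_alt (prime_scores : List Int) : List (Int × Int) :=
  (List.range prime_scores.length).map (fun i =>
    ((gdaPrev prime_scores (prime_scores.getD i 0) i : Int),
     (gdaNext prime_scores (prime_scores.getD i 0) (i + 1) : Int)))

-- ===== PRECONDITION & SPEC =====
def Spec_get_dominant_areas_py (prime_scores : List Int) (out : List (Int × Int)) : Prop := out = get_dominant_areas_py_alt prime_scores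
instance (prime_scores : List Int) (out : List (Int × Int)) : Decidable (Spec_get_dominant_areas_py prime_scores out) := by unfold Spec_get_dominant_areas_py; infer_instance

-- ===== CLAIM (what is proved, stated in full; the proofs are below) =====
def Claim_equal_get_dominant_areas_py : Prop := ∀ (prime_scores : List Int), Dom_get_dominant_areas_py prime_scores → Spec_get_dominant_areas_py prime_scores (get_dominant_areas_py prime_scores)

-- ===== LEMMAS AND PROOFS =====

-- j "survives" the prefix [0, i): no later element of the prefix is strictly greater
abbrev gdaSurv (s : List Int) (i j : Nat) : Prop := ∀ m < i, j < m → s.getD m 0 ≤ s.getD j 0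

-- the stack's index column after processing the prefix [0, i), top first
def gdaStk (s : List Int) (i : Nat) : List Nat :=
  ((List.range i).filter (fun j => decide (gdaSurv s i j))).reverse

def gdaEnt (s : List Int) (j : Nat) : Int × Nat × Nat :=
  (s.getD j 0, j, gdaPrev s (s.getD j 0) j)

def gdaVal (s : List Int) (j : Nat) : Int × Int :=
  ((gdaPrev s (s.getD j 0) j : Int), (gdaNext s (s.getD j 0) (j + 1) : Int))

-- res after processing the prefix [0, i)
def gdaRes (s : List Int) (i : Nat) : List (Int × Int) :=
  (List.range s.length).map (fun j => if j < i ∧ ¬ gdaSurv s i j then gdaVal s j else (-1, -1))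

theorem gdaPrev_none (s : List Int) (v : Int) (i : Nat)
    (h : ∀ j < i, s.getD j 0 < v) : gdaPrev s v i = 0 := by
  induction i with
  | zero => rfl
  | succ j ih =>
    simp only [gdaPrev, if_neg (not_le.mpr (h j (Nat.lt_succ_self j)))]
    exact ih (fun j' hj' => h j' (Nat.lt_succ_of_lt hj'))

theorem gdaPrev_found (s : List Int) (v : Int) (i t : Nat)
    (ht : t < i) (hv : v ≤ s.getD t 0) (h : ∀ m, t < m → m < i → s.getD m 0 < v) :
    gdaPrev s v i = t + 1 := by
  induction i with
  | zero => omega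
  | succ j ih =>
    by_cases hj : t = j
    · subst hj; simp only [gdaPrev]; rw [if_pos hv]
    · have htj : t < j := by omega
      simp only [gdaPrev, if_neg (not_le.mpr (h j htj (Nat.lt_succ_self j)))]
      exact ih htj (fun m hm1 hm2 => h m hm1 (Nat.lt_succ_of_lt hm2))

theorem gdaNext_none (s : List Int) (v : Int) (j : Nat)
    (h : ∀ m, j ≤ m → m < s.length → s.getD m 0 ≤ v) :
    gdaNext s v j = s.length - 1 := by
  by_cases hj : j < s.length
  · rw [gdaNext, dif_pos hj, if_neg (not_lt.mpr (h j le_rfl hj))]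
    exact gdaNext_none s v (j+1) (fun m hm1 hm2 => h m (by omega) hm2)
  · rw [gdaNext, dif_neg hj]
termination_by s.length - j

theorem gdaNext_found (s : List Int) (v : Int) (j i : Nat)
    (hji : j ≤ i) (hi : i < s.length) (hv : v < s.getD i 0)
    (h : ∀ m, j ≤ m → m < i → s.getD m 0 ≤ v) :
    gdaNext s v j = i - 1 := by
  by_cases hj : j = i
  · subst hj; rw [gdaNext, dif_pos hi, if_pos hv]
  · have hjl : j < s.length := by omega
    rw [gdaNext, dif_pos hjl, if_neg (not_lt.mpr (h j le_rfl (by omega)))]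
    exact gdaNext_found s v (j+1) i (by omega) hi hv (fun m hm1 hm2 => h m (by omega) hm2)
termination_by s.length - j

theorem gdaSurv_succ (s : List Int) (i j : Nat) (hj : j < i) :
    gdaSurv s (i + 1) j ↔ gdaSurv s i j ∧ s.getD i 0 ≤ s.getD j 0 := by
  constructor
  · intro h
    exact ⟨fun m hm1 hm2 => h m (by omega) hm2, h i (Nat.lt_succ_self i) hj⟩
  · rintro ⟨h1, h2⟩ m hm1 hm2
    rcases Nat.lt_or_ge m i with hmi | hmi
    · exact h1 m hmi hm2
    · have : m = i := by omega
      subst this; exact h2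

theorem gdaSurv_of_le (s : List Int) (i j : Nat) (h : i ≤ j + 1) : gdaSurv s i j := by
  intro m hm1 hm2; omega

-- any j < i with v ≤ score j yields a surviving j' ≥ j with v ≤ score j'
theorem gdaSurv_exists (s : List Int) (i : Nat) (v : Int) :
    ∀ j, j < i → v ≤ s.getD j 0 →
      ∃ j', j ≤ j' ∧ j' < i ∧ gdaSurv s i j' ∧ v ≤ s.getD j' 0 := by
  intro j
  induction hk : i - j using Nat.strong_induction_on generalizing j with
  | _ k ih =>
    intro hj hv
    by_cases hs : gdaSurv s i j
    · exact ⟨j, le_rfl, hj, hs, hv⟩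
    · simp only [gdaSurv, not_forall] at hs
      obtain ⟨m, hm1, hm2, hm3⟩ := hs
      obtain ⟨j', h1, h2, h3, h4⟩ :=
        ih (i - m) (by omega) m rfl hm1 (le_of_lt (lt_of_le_of_lt hv (not_le.mp hm3)))
      exact ⟨j', by omega, h2, h3, h4⟩

theorem gdaStk_mem (s : List Int) (i j : Nat) :
    j ∈ gdaStk s i ↔ j < i ∧ gdaSurv s i j := by
  simp [gdaStk, List.mem_filter]

theorem gdaStk_pairwise (s : List Int) (i : Nat) : (gdaStk s i).Pairwise (· > ·) := by
  unfold gdaStk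
  rw [List.pairwise_reverse]
  exact List.Pairwise.filter _ List.pairwise_lt_range

-- helper: upgrade Pairwise using membership
theorem pairwise_imp_mem {α : Type} {R S : α → α → Prop} {l : List α}
    (h : l.Pairwise R) (h2 : ∀ a ∈ l, ∀ b ∈ l, R a b → S a b) : l.Pairwise S := by
  induction h with
  | nil => exact List.Pairwise.nil
  | @cons a l' hr hp ih =>
    refine List.Pairwise.cons ?_ (ih ?_)
    · intro b hb; exact h2 _ (by simp) _ (by simp [hb]) (hr b hb)
    · intro a' ha' b hb hr'; exact h2 _ (by simp [ha']) _ (by simp [hb]) hr'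

-- scores are monotone along the stack: an earlier (larger-index) entry has a ≤ score
theorem gdaStk_scores (s : List Int) (i : Nat) :
    (gdaStk s i).Pairwise (fun a b => s.getD a 0 ≤ s.getD b 0) := by
  refine pairwise_imp_mem (gdaStk_pairwise s i) ?_
  intro a ha b hb hab
  rw [gdaStk_mem] at ha hb
  exact hb.2 a ha.1 hab

-- dropWhile on a list whose Pairwise relation propagates p backwards
theorem dropWhile_all_not {α : Type} (p : α → Bool) (l : List α)
    (h : l.Pairwise (fun a b => p b = true → p a = true)) :
    ∀ x ∈ l.dropWhile p, p x = false := by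
  induction l with
  | nil => simp
  | cons a tl ih =>
    intro x hx
    by_cases ha : p a = true
    · rw [List.dropWhile_cons_of_pos ha] at hx
      exact ih (List.Pairwise.of_cons h) x hx
    · rw [List.dropWhile_cons_of_neg ha] at hx
      rcases List.mem_cons.mp hx with h1 | h1
      · subst h1; exact Bool.eq_false_iff.mpr ha
      · by_cases hpx : p x = true
        · exact absurd ((List.pairwise_cons.mp h).1 x h1 hpx) ha
        · exact Bool.eq_false_iff.mpr hpx

theorem filter_eq_dropWhile {α : Type} (p : α → Bool) (l : List α)
    (h : l.Pairwise (fun a b => p b = true → p a = true)) :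
    l.filter (fun x => ! p x) = l.dropWhile p := by
  induction l with
  | nil => rfl
  | cons a tl ih =>
    by_cases ha : p a = true
    · rw [List.dropWhile_cons_of_pos ha, List.filter_cons, if_neg (by simp [ha])]
      exact ih (List.Pairwise.of_cons h)
    · rw [List.dropWhile_cons_of_neg ha, List.filter_cons, if_pos (by simp [ha])]
      congr 1
      refine List.filter_eq_self.mpr ?_
      intro x hx
      by_cases hpx : p x = true
      · exact absurd ((List.pairwise_cons.mp h).1 x hx hpx) ha
      · simp [hpx]

-- fold of positional writes, pointwise
theorem foldl_set_getElem? {α : Type} (w : Nat → α) (A : List Nat) (r : List α) (k : Nat) :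
    (A.foldl (fun r j => r.set j (w j)) r)[k]? =
      if k ∈ A ∧ k < r.length then some (w k) else r[k]? := by
  induction A generalizing r with
  | nil => simp
  | cons a tl ih =>
    simp only [List.foldl_cons, ih, List.length_set]
    by_cases hk : k < r.length
    · by_cases htl : k ∈ tl
      · simp [htl, hk]
      · simp only [htl, List.mem_cons, or_false, hk, and_true]
        rw [List.getElem?_set]
        by_cases hak : a = k
        · subst hak; simp [hk]
        · simp [hak, Ne.symm hak]
    · have h1 : (r.set a (w a))[k]? = none := List.getElem?_eq_none (by simpa using Nat.le_of_not_lt hk)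
      have h2 : r[k]? = none := List.getElem?_eq_none (Nat.le_of_not_lt hk)
      simp only [hk, and_false, if_neg, not_false_iff, h1, h2]

-- the pop loop on a split stack
theorem gdaPop_spec (v : Int) (i : Nat) (res : List (Int × Int))
    (A B : List (Int × Nat × Nat))
    (hA : ∀ e ∈ A, e.1 < v) (hB : ∀ e ∈ B, ¬ e.1 < v) :
    gdaPop v i res (A ++ B) =
      (A.foldl (fun r e => r.set e.2.1 ((e.2.2 : Int), (i : Int) - 1)) res, B) := by
  induction A generalizing res with
  | nil =>
    cases B with
    | nil => rfl
    | cons b tl =>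
      obtain ⟨sc, j, st⟩ := b
      simp only [List.nil_append, gdaPop, List.foldl_nil]
      rw [if_neg (hB (sc, j, st) (by simp))]
  | cons a tl ih =>
    obtain ⟨sc, j, st⟩ := a
    simp only [List.cons_append, gdaPop, List.foldl_cons]
    rw [if_pos (hA (sc, j, st) (by simp))]
    exact ih _ (fun e he => hA e (by simp [he]))


-- the stack's p-propagating pairwise property for score threshold v
theorem gdaStk_prop (s : List Int) (i : Nat) (v : Int) :
    (gdaStk s i).Pairwise
      (fun a b => (decide (s.getD b 0 < v) = true) → (decide (s.getD a 0 < v) = true)) := by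
  refine (gdaStk_scores s i).imp ?_
  intro a b hab hb
  simp only [decide_eq_true_eq] at *
  omega

theorem gdaStk_succ (s : List Int) (i : Nat) :
    gdaStk s (i + 1) =
      i :: (gdaStk s i).dropWhile (fun j => decide (s.getD j 0 < s.getD i 0)) := by
  have hsplit : (List.range (i+1)).filter (fun j => decide (gdaSurv s (i+1) j)) =
      ((List.range i).filter (fun j => decide (gdaSurv s (i+1) j))) ++ [i] := by
    rw [List.range_succ, List.filter_append]
    congr 1
    simp only [List.filter_cons, List.filter_nil]
    rw [if_pos (decide_eq_true (gdaSurv_of_le s (i+1) i (by omega)))]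
  have hinner : (List.range i).filter (fun j => decide (gdaSurv s (i+1) j)) =
      ((List.range i).filter (fun j => decide (gdaSurv s i j))).filter
        (fun j => decide (s.getD i 0 ≤ s.getD j 0)) := by
    rw [List.filter_filter]
    refine List.filter_congr ?_
    intro j hj
    rw [List.mem_range] at hj
    rw [decide_eq_decide.mpr (gdaSurv_succ s i j hj), Bool.decide_and]
    exact Bool.and_comm _ _
  unfold gdaStk
  rw [hsplit, List.reverse_append, List.reverse_singleton, List.singleton_append, hinner,
      ← List.filter_reverse]
  congr 1
  have hfc : ((List.range i).filter (fun j => decide (gdaSurv s i j))).reverse.filter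
        (fun j => decide (s.getD i 0 ≤ s.getD j 0)) =
      ((List.range i).filter (fun j => decide (gdaSurv s i j))).reverse.filter
        (fun j => ! decide (s.getD j 0 < s.getD i 0)) := by
    refine List.filter_congr ?_
    intro j _
    rw [← decide_not, decide_eq_decide]
    exact not_lt.symm
  rw [hfc]
  exact filter_eq_dropWhile _ _ (gdaStk_prop s i (s.getD i 0))

-- start value of a freshly pushed entry, from the stack left after popping
theorem gdaPrev_of_drop_nil (s : List Int) (i : Nat)
    (h : (gdaStk s i).dropWhile (fun j => decide (s.getD j 0 < s.getD i 0)) = []) :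
    gdaPrev s (s.getD i 0) i = 0 := by
  refine gdaPrev_none s _ i ?_
  intro j hj
  by_contra hge
  push Not at hge
  obtain ⟨j', _, hj2, hj3, hj4⟩ := gdaSurv_exists s i (s.getD i 0) j hj hge
  have hmem : j' ∈ gdaStk s i := (gdaStk_mem s i j').mpr ⟨hj2, hj3⟩
  rw [← List.takeWhile_append_dropWhile
      (p := fun j => decide (s.getD j 0 < s.getD i 0)) (l := gdaStk s i), h,
      List.append_nil] at hmem
  have := List.mem_takeWhile_imp hmem
  simp only [decide_eq_true_eq] at this
  omega

theorem gdaPrev_of_drop_cons (s : List Int) (i t : Nat) (rest : List Nat)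
    (h : (gdaStk s i).dropWhile (fun j => decide (s.getD j 0 < s.getD i 0)) = t :: rest) :
    gdaPrev s (s.getD i 0) i = t + 1 := by
  have hsub : (t :: rest).Sublist (gdaStk s i) := h ▸ List.dropWhile_sublist _
  have htmem : t ∈ gdaStk s i := hsub.mem (by simp)
  rw [gdaStk_mem] at htmem
  have htge : s.getD i 0 ≤ s.getD t 0 := by
    have := dropWhile_all_not _ _ (gdaStk_prop s i (s.getD i 0)) t (by rw [h]; simp)
    simp only [decide_eq_false_iff_not, not_lt] at this
    exact this
  refine gdaPrev_found s _ i t htmem.1 htge ?_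
  intro m hm1 hm2
  by_contra hge
  push Not at hge
  obtain ⟨j', hj1, hj2, hj3, hj4⟩ := gdaSurv_exists s i (s.getD i 0) m hm2 hge
  have hmem : j' ∈ gdaStk s i := (gdaStk_mem s i j').mpr ⟨hj2, hj3⟩
  rw [← List.takeWhile_append_dropWhile
      (p := fun j => decide (s.getD j 0 < s.getD i 0)) (l := gdaStk s i), h] at hmem
  rcases List.mem_append.mp hmem with hmem | hmem
  · have := List.mem_takeWhile_imp hmem
    simp only [decide_eq_true_eq] at this
    omega
  · rcases List.mem_cons.mp hmem with h1 | h1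
    · omega
    · have hpw : (t :: rest).Pairwise (· > ·) := List.Pairwise.sublist hsub (gdaStk_pairwise s i)
      have := (List.pairwise_cons.mp hpw).1 j' h1
      omega

-- res after the pop phase of step i
theorem gdaRes_succ (s : List Int) (i : Nat) (hi : i < s.length) :
    gdaRes s (i + 1) =
      ((gdaStk s i).takeWhile (fun j => decide (s.getD j 0 < s.getD i 0))).foldl
        (fun r j => r.set j ((gdaPrev s (s.getD j 0) j : Int), (i : Int) - 1))
        (gdaRes s i) := by
  have hlen : (gdaRes s i).length = s.length := by simp [gdaRes]
  refine List.ext_getElem? ?_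
  intro k
  rw [foldl_set_getElem?, hlen]
  have halt : ∀ (m : Nat), (gdaRes s m)[k]? =
      if k < s.length then
        some (if k < m ∧ ¬ gdaSurv s m k then gdaVal s k else (-1, -1)) else none := by
    intro m
    by_cases hk : k < s.length
    · simp [gdaRes, hk]
    · simp [gdaRes, not_lt.mp hk]
  by_cases hk : k < s.length
  · rw [halt (i+1), halt i, if_pos hk, if_pos hk]
    by_cases hT : k ∈ (gdaStk s i).takeWhile (fun j => decide (s.getD j 0 < s.getD i 0))
    · -- popped: k < i, surv i k, score < score i
      have hmem : k ∈ gdaStk s i := ((List.takeWhile_sublist _).mem hT)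
      rw [gdaStk_mem] at hmem
      have hlt : s.getD k 0 < s.getD i 0 := by
        have := List.mem_takeWhile_imp hT
        simpa using this
      have hns : ¬ gdaSurv s (i+1) k := by
        intro hs
        exact absurd (hs i (Nat.lt_succ_self i) hmem.1) (not_le.mpr hlt)
      rw [if_pos ⟨by omega, hns⟩, if_pos ⟨hT, hk⟩]
      have hnext : gdaNext s (s.getD k 0) (k + 1) = i - 1 :=
        gdaNext_found s _ (k+1) i (by omega) hi hlt
          (fun m hm1 hm2 => hmem.2 m hm2 (by omega))
      simp only [gdaVal, hnext]
      congr 2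
      omega
    · have hnotT : ¬ (k ∈ (gdaStk s i).takeWhile (fun j => decide (s.getD j 0 < s.getD i 0))
          ∧ k < s.length) := fun hc => hT hc.1
      rw [if_neg hnotT]
      by_cases hki : k < i
      · by_cases hsv : gdaSurv s i k
        · have hsv1 : gdaSurv s (i+1) k := by
            rw [gdaSurv_succ s i k hki]
            refine ⟨hsv, ?_⟩
            by_contra hlt
            push Not at hlt
            have hmem : k ∈ gdaStk s i := (gdaStk_mem s i k).mpr ⟨hki, hsv⟩
            rw [← List.takeWhile_append_dropWhile
                (p := fun j => decide (s.getD j 0 < s.getD i 0)) (l := gdaStk s i)] at hmem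
            rcases List.mem_append.mp hmem with h1 | h1
            · exact hT h1
            · have h2 := dropWhile_all_not _ _ (gdaStk_prop s i (s.getD i 0)) k h1
              simp only [decide_eq_false_iff_not, not_lt] at h2
              omega
          rw [if_neg (fun hc => hc.2 hsv1), if_neg (fun hc => hc.2 hsv)]
        · have hns1 : ¬ gdaSurv s (i+1) k := by
            intro hs
            exact hsv ((gdaSurv_succ s i k hki).mp hs).1
          rw [if_pos ⟨by omega, hns1⟩, if_pos ⟨hki, hsv⟩]
      · by_cases hkei : k = i
        · subst hkei
          rw [if_neg (fun hc => hc.2 (gdaSurv_of_le s (k+1) k (by omega))), if_neg (by omega)]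
        · rw [if_neg (by omega), if_neg (by omega)]
  · rw [halt (i+1), halt i, if_neg hk, if_neg hk, if_neg (by omega)]

-- the main invariant: state after the prefix [0, i)
theorem gda_inv (s : List Int) : ∀ i, i ≤ s.length →
    (List.range i).foldl (fun acc k => gdaStep acc k (s.getD k 0))
        (List.replicate s.length ((-1 : Int), (-1 : Int)), []) =
      (gdaRes s i, (gdaStk s i).map (gdaEnt s)) := by
  intro i
  induction i with
  | zero =>
    intro _
    simp [gdaRes, gdaStk, List.map_const']
  | succ i ih =>
    intro hi
    have hilt : i < s.length := by omega
    rw [List.range_succ, List.foldl_append, ih (by omega), List.foldl_cons, List.foldl_nil]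
    -- one step
    set p : Nat → Bool := fun j => decide (s.getD j 0 < s.getD i 0) with hp
    have hsplitm : (gdaStk s i).map (gdaEnt s) =
        ((gdaStk s i).takeWhile p).map (gdaEnt s) ++ ((gdaStk s i).dropWhile p).map (gdaEnt s) := by
      rw [← List.map_append, List.takeWhile_append_dropWhile]
    have hpop : gdaPop (s.getD i 0) i (gdaRes s i) ((gdaStk s i).map (gdaEnt s)) =
        (gdaRes s (i+1), ((gdaStk s i).dropWhile p).map (gdaEnt s)) := by
      rw [hsplitm, gdaPop_spec]
      · rw [List.foldl_map, gdaRes_succ s i hilt]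
        rfl
      · intro e he
        obtain ⟨j, hj, rfl⟩ := List.mem_map.mp he
        have := List.mem_takeWhile_imp hj
        simpa [gdaEnt, hp] using this
      · intro e he
        obtain ⟨j, hj, rfl⟩ := List.mem_map.mp he
        have := dropWhile_all_not p _ (gdaStk_prop s i (s.getD i 0)) j hj
        simpa [gdaEnt, hp] using this
    show gdaStep (gdaRes s i, (gdaStk s i).map (gdaEnt s)) i (s.getD i 0) = _
    unfold gdaStep
    rw [hpop]
    cases hD : (gdaStk s i).dropWhile p with
    | nil =>
      simp only [List.map_nil]
      rw [gdaStk_succ s i, hD]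
      simp only [List.map_cons, List.map_nil, gdaEnt]
      rw [gdaPrev_of_drop_nil s i (by rw [← hp]; exact hD)]
    | cons t rest =>
      simp only [List.map_cons, gdaEnt]
      rw [gdaStk_succ s i, hD]
      simp only [List.map_cons, gdaEnt]
      rw [gdaPrev_of_drop_cons s i t rest (by rw [← hp]; exact hD)]

theorem gda_final (s : List Int) :
    get_dominant_areas_py s = get_dominant_areas_py_alt s := by
  unfold get_dominant_areas_py
  have hzip : s.zipIdx = (List.range s.length).map (fun k => (s.getD k 0, k)) := by
    apply List.ext_getElem
    · simp
    · intro k h1 h2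
      simp only [List.getElem_zipIdx, List.getElem_map, List.getElem_range, List.getD]
      rw [List.getElem?_eq_getElem (by simpa using h1)]
      simp
  rw [hzip]
  simp only [List.foldl_map, gda_inv s s.length le_rfl, ← List.map_reverse, List.foldl_map]
  have hfold : ∀ r, (gdaStk s s.length).reverse.foldl
      (fun (r : List (Int × Int)) (j : Nat) =>
        r.set (gdaEnt s j).2.1 (((gdaEnt s j).2.2 : Int), (s.length : Int) - 1)) r =
      (gdaStk s s.length).reverse.foldl
      (fun r j => r.set j ((gdaPrev s (s.getD j 0) j : Int), (s.length : Int) - 1)) r := by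
    intro r
    rfl
  rw [hfold]
  have hlen : (gdaRes s s.length).length = s.length := by simp [gdaRes]
  refine List.ext_getElem? ?_
  intro k
  rw [foldl_set_getElem?, hlen]
  by_cases hk : k < s.length
  · have halt : (get_dominant_areas_py_alt s)[k]? = some (gdaVal s k) := by
      simp [get_dominant_areas_py_alt, gdaVal, hk]
    rw [halt]
    by_cases hm : k ∈ (gdaStk s s.length).reverse
    · rw [if_pos ⟨hm, hk⟩]
      rw [List.mem_reverse, gdaStk_mem] at hm
      have hnext : gdaNext s (s.getD k 0) (k + 1) = s.length - 1 :=
        gdaNext_none s _ (k+1) (fun m hm1 hm2 => hm.2 m hm2 (by omega))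
      simp only [gdaVal, hnext]
      congr 3
      omega
    · rw [if_neg (by simp [hm])]
      rw [List.mem_reverse, gdaStk_mem] at hm
      have hns : ¬ gdaSurv s s.length k := fun hs => hm ⟨hk, hs⟩
      rw [gdaRes, List.getElem?_map, List.getElem?_range hk]
      simp only [Option.map_some]
      rw [if_pos ⟨hk, hns⟩]
  · rw [if_neg (by omega)]
    have h1 : (gdaRes s s.length)[k]? = none := List.getElem?_eq_none (by omega)
    have h2 : (get_dominant_areas_py_alt s)[k]? = none := by
      apply List.getElem?_eq_none
      simp [get_dominant_areas_py_alt]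
      omega
    rw [h1, h2]

-- ===== VERDICT (by name: the statement is the Claim_ definition above) =====
theorem get_dominant_areas_py_spec : Claim_equal_get_dominant_areas_py := by
  intro s _
  exact gda_final s
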